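-- pv_equiv track=rewrite | github.com/R3Dzf/KMAP | logic.py | _beautify_expr
-- ===== SOURCE A (Python) =====
-- def _beautify_expr(sympy_style: str, display_map=None) -> str:
--     """Convert SymPy-friendly logical text into SOP-like notation."""
--     parts: list[str] = []
--     i = 0
--     while i < len(sympy_style):
--         ch = sympy_style[i]
--         if ch == "~":
--             if i + 1 < len(sympy_style) and sympy_style[i + 1].isalpha():
--                 symbol = sympy_style[i + 1]
--                 name = display_map.get(symbol, symbol) if display_map else symbol
--                 parts.append(f"{name}'")
--                 i += 2
--                 continue
--             parts.append("~")
--             i += 1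
--             continue
--         if ch == "&":
--             i += 1
--             continue
--         if ch == "|":
--             parts.append(" + ")
--             i += 1
--             continue
--         if ch.isalpha() and display_map:
--             parts.append(display_map.get(ch, ch))
--         else:
--             parts.append(ch)
--         i += 1
--     return "".join(parts)
-- ===== SOURCE B (Python) =====
-- def _beautify_expr(sympy_style: str, display_map=None) -> str:
--     """Convert SymPy-friendly logical text into SOP-like notation."""
--     dm = display_map if display_map else {}
--
--     def render(term: str) -> str:
--         out: list[str] = []
--         j = 0
--         while j < len(term):
--             c = term[j]
--             if c == "~" and j + 1 < len(term) and term[j + 1].isalpha():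
--                 out.append(dm.get(term[j + 1], term[j + 1]) + "'")
--                 j += 2
--             elif c == "&":
--                 j += 1
--             elif c.isalpha():
--                 out.append(dm.get(c, c))
--                 j += 1
--             else:
--                 out.append(c)
--                 j += 1
--         return "".join(out)
--
--     return " + ".join(render(t) for t in sympy_style.split("|"))
-- ===== Notes on version B (the rewrite author's own statement) =====
-- stated objective: simpler
-- what changed: A's single indexed while-loop with an inline '|' branch is re-decomposed as split-on-'|', a per-term character renderer, and ' + '.join of the rendered terms, with the optional display map normalised once up front instead of truthiness-tested at every character.
import Mathlib
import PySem

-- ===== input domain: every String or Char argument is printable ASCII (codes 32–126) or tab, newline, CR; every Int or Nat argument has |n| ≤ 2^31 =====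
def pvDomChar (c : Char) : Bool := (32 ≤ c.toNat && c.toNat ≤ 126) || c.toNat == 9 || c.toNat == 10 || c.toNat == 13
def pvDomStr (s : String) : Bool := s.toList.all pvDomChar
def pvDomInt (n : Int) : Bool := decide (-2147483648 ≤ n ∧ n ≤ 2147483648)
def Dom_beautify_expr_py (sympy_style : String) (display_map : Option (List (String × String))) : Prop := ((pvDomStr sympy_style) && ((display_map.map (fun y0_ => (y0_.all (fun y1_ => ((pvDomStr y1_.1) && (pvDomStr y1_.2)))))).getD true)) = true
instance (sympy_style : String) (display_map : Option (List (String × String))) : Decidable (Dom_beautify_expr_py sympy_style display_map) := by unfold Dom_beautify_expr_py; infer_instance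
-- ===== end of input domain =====

-- B re-decomposes A's single indexed while-loop as split-on-'|' / render each term / ' + '-join (objective: simpler decomposition, same cost).

-- ===== PORT A =====
-- truthiness of the optional dict (Python `if display_map`)
def pvTruthy (display_map : Option (List (String × String))) : Bool :=
  match display_map with
  | none => false
  | some d => !d.isEmpty

-- display_map.get(sym, sym) for a one-char symbol; assoc-list lookup = first match
def pvGetA (display_map : Option (List (String × String))) (c : Char) : List Char :=
  (((display_map.getD []).lookup (String.ofList [c])).getD (String.ofList [c])).toList

-- the while-loop of A, producing the `parts` list (each part as a char list)
def pvPartsA (display_map : Option (List (String × String))) : List Char → List (List Char)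
  | [] => []
  | '~' :: c :: rest =>
      if c.isAlpha then
        ((if pvTruthy display_map then pvGetA display_map c else [c]) ++ ['\'']) :: pvPartsA display_map rest
      else ['~'] :: pvPartsA display_map (c :: rest)
  | ['~'] => [['~']]
  | '&' :: rest => pvPartsA display_map rest
  | '|' :: rest => [' ', '+', ' '] :: pvPartsA display_map rest
  | c :: rest =>
      (if c.isAlpha && pvTruthy display_map then pvGetA display_map c else [c]) :: pvPartsA display_map rest

def beautify_expr_py (sympy_style : String) (display_map : Option (List (String × String))) : String :=
  String.ofList (pvPartsA display_map sympy_style.toList).flatten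

-- ===== PORT B =====
-- dm = display_map if display_map else {}
def pvDmB (display_map : Option (List (String × String))) : List (String × String) :=
  match display_map with
  | none => []
  | some d => if d.isEmpty then [] else d

-- dm.get(c, c)
def pvGetB (display_map : Option (List (String × String))) (c : Char) : List Char :=
  (((pvDmB display_map).lookup (String.ofList [c])).getD (String.ofList [c])).toList

-- the per-term renderer of B
def pvRenderB (display_map : Option (List (String × String))) : List Char → List Char
  | [] => []
  | '~' :: c :: rest =>
      if c.isAlpha then pvGetB display_map c ++ '\'' :: pvRenderB display_map rest
      else '~' :: pvRenderB display_map (c :: rest)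
  | c :: rest =>
      if c = '&' then pvRenderB display_map rest
      else if c.isAlpha then pvGetB display_map c ++ pvRenderB display_map rest
      else c :: pvRenderB display_map rest

-- port of sympy_style.split("|") (single-char separator; exact for this Python)
def pvSplitBar : List Char → List (List Char)
  | [] => [[]]
  | '|' :: rest => [] :: pvSplitBar rest
  | c :: rest => (c :: (pvSplitBar rest).headI) :: (pvSplitBar rest).tail

-- port of " + ".join(parts)
def pvJoinRest : List (List Char) → List Char
  | [] => []
  | t :: ts => ' ' :: '+' :: ' ' :: (t ++ pvJoinRest ts)

def pvJoin : List (List Char) → List Char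
  | [] => []
  | t :: ts => t ++ pvJoinRest ts

def beautify_expr_py_alt (sympy_style : String) (display_map : Option (List (String × String))) : String :=
  String.ofList (pvJoin ((pvSplitBar sympy_style.toList).map (pvRenderB display_map)))

-- ===== PRECONDITION & SPEC =====
def Spec_beautify_expr_py (sympy_style : String) (display_map : Option (List (String × String))) (out : String) : Prop := out = beautify_expr_py_alt sympy_style display_map
instance (sympy_style : String) (display_map : Option (List (String × String))) (out : String) : Decidable (Spec_beautify_expr_py sympy_style display_map out) := by unfold Spec_beautify_expr_py; infer_instance

-- ===== CLAIM (what is proved, stated in full; the proofs are below) =====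
def Claim_equal_beautify_expr_py : Prop := ∀ (sympy_style : String) (display_map : Option (List (String × String))), Dom_beautify_expr_py sympy_style display_map → Spec_beautify_expr_py sympy_style display_map (beautify_expr_py sympy_style display_map)

-- ===== LEMMAS AND PROOFS =====

theorem pvGetB_truthy (dm : Option (List (String × String))) (c : Char)
    (h : pvTruthy dm = true) : pvGetB dm c = pvGetA dm c := by
  cases dm with
  | none => simp [pvTruthy] at h
  | some d =>
    simp [pvTruthy] at h
    simp [pvGetB, pvGetA, pvDmB, h]

theorem pvGetB_falsy (dm : Option (List (String × String))) (c : Char)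
    (h : pvTruthy dm = false) : pvGetB dm c = [c] := by
  cases dm with
  | none => simp [pvGetB, pvDmB]
  | some d =>
    simp [pvTruthy] at h
    simp [pvGetB, pvDmB, h]

theorem pvSplitBar_cons_ne (c : Char) (rest : List Char) (h : c ≠ '|') :
    pvSplitBar (c :: rest) = (c :: (pvSplitBar rest).headI) :: (pvSplitBar rest).tail := by
  rw [pvSplitBar.eq_def]
  cases rest with
  | nil => simp_all
  | cons a b => simp_all

theorem pvSplitBar_ne_nil (cs : List Char) : pvSplitBar cs ≠ [] := by
  match cs with
  | [] => simp [pvSplitBar]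
  | '|' :: rest => simp [pvSplitBar]
  | c :: rest =>
    by_cases h : c = '|'
    · subst h; simp [pvSplitBar]
    · rw [pvSplitBar_cons_ne c rest h]; simp

-- a '~' not followed by a letter renders as itself
theorem pvRenderB_tilde (dm : Option (List (String × String))) (h : List Char)
    (hh : h = [] ∨ ∃ c' h', h = c' :: h' ∧ c'.isAlpha = false) :
    pvRenderB dm ('~' :: h) = '~' :: pvRenderB dm h := by
  rcases hh with rfl | ⟨c', h', rfl, hc⟩
  · simp [pvRenderB]
  · simp [pvRenderB, hc]

theorem pvRenderB_cons (dm : Option (List (String × String))) (c : Char) (h0 : List Char) (hc : c ≠ '~') :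
    pvRenderB dm (c :: h0) = if c = '&' then pvRenderB dm h0 else if c.isAlpha then pvGetB dm c ++ pvRenderB dm h0 else c :: pvRenderB dm h0 := by
  rw [pvRenderB.eq_def]
  cases h0 with
  | nil => simp
  | cons a b => simp [hc]

theorem pvPartsA_cons (dm : Option (List (String × String))) (c : Char) (rest : List Char)
    (h1 : c ≠ '~') (h2 : c ≠ '&') (h3 : c ≠ '|') :
    pvPartsA dm (c :: rest) = (if c.isAlpha && pvTruthy dm then pvGetA dm c else [c]) :: pvPartsA dm rest := by
  rw [pvPartsA.eq_def]
  cases rest with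
  | nil => simp [h1]
  | cons a b => simp [h1]

theorem pvMain (dm : Option (List (String × String))) (cs : List Char) :
    (pvPartsA dm cs).flatten = pvJoin ((pvSplitBar cs).map (pvRenderB dm)) := by
  induction cs using pvPartsA.induct with
  | case1 => simp [pvPartsA, pvSplitBar, pvRenderB, pvJoin, pvJoinRest]
  | case2 c rest hc ih =>
    -- '~' :: c :: rest, c alphabetic
    have hcne : c ≠ '|' := by rintro rfl; simp at hc
    obtain ⟨h, t, hst⟩ : ∃ h t, pvSplitBar (c :: rest) = h :: t := by
      rw [pvSplitBar_cons_ne c rest hcne]; exact ⟨_, _, rfl⟩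
    have htil : pvSplitBar ('~' :: c :: rest) = ('~' :: c :: (pvSplitBar rest).headI) :: (pvSplitBar rest).tail := by
      rw [pvSplitBar_cons_ne '~' (c :: rest) (by decide), pvSplitBar_cons_ne c rest hcne]
      simp
    obtain ⟨h0, t0, hst0⟩ : ∃ h0 t0, pvSplitBar rest = h0 :: t0 := by
      cases hsr : pvSplitBar rest with
      | nil => exact absurd hsr (pvSplitBar_ne_nil rest)
      | cons a b => exact ⟨a, b, rfl⟩
    rw [pvPartsA, if_pos hc]
    rw [htil, hst0]
    simp only [List.headI, List.tail_cons, List.map_cons, pvJoin, List.flatten_cons]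
    rw [pvRenderB, if_pos hc]
    rw [ih, hst0]
    simp only [List.map_cons, pvJoin]
    by_cases hT : pvTruthy dm = true
    · rw [if_pos hT, pvGetB_truthy dm c hT]; simp
    · rw [if_neg hT, pvGetB_falsy dm c (by simpa using hT)]; simp
  | case3 c rest hc ih =>
    -- '~' :: c :: rest, c not alphabetic
    rw [pvPartsA, if_neg hc]
    obtain ⟨h0, t0, hst0⟩ : ∃ h0 t0, pvSplitBar (c :: rest) = h0 :: t0 := by
      cases hsr : pvSplitBar (c :: rest) with
      | nil => exact absurd hsr (pvSplitBar_ne_nil _)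
      | cons a b => exact ⟨a, b, rfl⟩
    have htil : pvSplitBar ('~' :: c :: rest) = ('~' :: h0) :: t0 := by
      rw [pvSplitBar_cons_ne '~' (c :: rest) (by decide), hst0]; simp
    have hshape : h0 = [] ∨ ∃ c' h', h0 = c' :: h' ∧ c'.isAlpha = false := by
      by_cases hcb : c = '|'
      · subst hcb
        have : pvSplitBar ('|' :: rest) = [] :: pvSplitBar rest := by simp [pvSplitBar]
        rw [this] at hst0
        exact Or.inl (by injection hst0 with h1 _; exact h1.symm)
      · rw [pvSplitBar_cons_ne c rest hcb] at hst0
        refine Or.inr ⟨c, (pvSplitBar rest).headI, ?_, by simpa using hc⟩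
        injection hst0 with h1 _; exact h1.symm
    rw [htil]
    simp only [List.map_cons, pvJoin]
    rw [pvRenderB_tilde dm h0 hshape]
    rw [hst0] at ih
    simp only [List.flatten_cons, List.map_cons, pvJoin] at ih ⊢
    simp [ih]
  | case4 => simp [pvPartsA, pvSplitBar, pvRenderB, pvJoin, pvJoinRest]
  | case5 rest ih =>
    -- '&' :: rest
    rw [pvPartsA]
    obtain ⟨h0, t0, hst0⟩ : ∃ h0 t0, pvSplitBar rest = h0 :: t0 := by
      cases hsr : pvSplitBar rest with
      | nil => exact absurd hsr (pvSplitBar_ne_nil _)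
      | cons a b => exact ⟨a, b, rfl⟩
    have hs : pvSplitBar ('&' :: rest) = ('&' :: h0) :: t0 := by
      rw [pvSplitBar_cons_ne '&' rest (by decide), hst0]; simp
    rw [hs]
    simp only [List.map_cons, pvJoin]
    have : pvRenderB dm ('&' :: h0) = pvRenderB dm h0 := by
      cases h0 with
      | nil => simp [pvRenderB]
      | cons a b => simp [pvRenderB]
    rw [this, ih, hst0]
    simp only [List.map_cons, pvJoin]
  | case6 rest ih =>
    -- '|' :: rest
    rw [pvPartsA]
    obtain ⟨h0, t0, hst0⟩ : ∃ h0 t0, pvSplitBar rest = h0 :: t0 := by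
      cases hsr : pvSplitBar rest with
      | nil => exact absurd hsr (pvSplitBar_ne_nil _)
      | cons a b => exact ⟨a, b, rfl⟩
    have hs : pvSplitBar ('|' :: rest) = [] :: pvSplitBar rest := by simp [pvSplitBar]
    rw [hs, hst0]
    simp only [List.map_cons, pvJoin, pvJoinRest, List.flatten_cons]
    rw [ih, hst0]
    simp only [List.map_cons, pvJoin]
    simp [pvRenderB]
  | case7 c rest h1 h2 h3 h4 ih =>
    -- default character
    have hcn : c ≠ '~' := by
      intro e
      cases rest with
      | nil => exact h2 e rfl
      | cons a b => exact h1 a b e rfl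
    have hca : c ≠ '&' := fun e => h3 e
    have hcb : c ≠ '|' := fun e => h4 e
    obtain ⟨h0, t0, hst0⟩ : ∃ h0 t0, pvSplitBar rest = h0 :: t0 := by
      cases hsr : pvSplitBar rest with
      | nil => exact absurd hsr (pvSplitBar_ne_nil _)
      | cons a b => exact ⟨a, b, rfl⟩
    have hs : pvSplitBar (c :: rest) = (c :: h0) :: t0 := by
      rw [pvSplitBar_cons_ne c rest hcb, hst0]; simp
    rw [pvPartsA_cons dm c rest hcn hca hcb, hs]
    simp only [List.map_cons, pvJoin, List.flatten_cons]
    rw [pvRenderB_cons dm c h0 hcn, if_neg hca]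
    rw [ih, hst0]
    simp only [List.map_cons, pvJoin]
    by_cases halpha : c.isAlpha
    · rw [if_pos halpha]
      by_cases hT : pvTruthy dm = true
      · rw [pvGetB_truthy dm c hT]; simp [halpha, hT]
      · rw [pvGetB_falsy dm c (by simpa using hT)]
        simp only [Bool.and_eq_true] at *
        simp [halpha, hT]
    · simp [halpha]

-- ===== VERDICT (by name: the statement is the Claim_ definition above) =====
theorem beautify_expr_py_spec : Claim_equal_beautify_expr_py := by
  intro s dm _
  unfold Spec_beautify_expr_py beautify_expr_py beautify_expr_py_alt
  rw [pvMain]
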